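-- pv_equiv track=rewrite | github.com/Shawnleeeeee/phoenix-market-learning-sprint | archive/legacy_runners/tmp_stage2_exploration_v03_legacy.py | _is_system_anomaly
-- ===== SOURCE A (Python) =====
-- def _is_system_anomaly(errors: list[str]) -> bool:
--     non_system_prefixes = {
--         "market_regime_not_trend_up_or_down",
--         "candidate_direction_not_trend_aligned",
--         "direction_regime_not_allowed",
--         "selected_exchange_filter_not_checked",
--         "selected_symbol_not_tradeable",
--         "selected_micro_notional_infeasible",
--         "required_quote_allocation_exceeds_max",
--         "top_candidates_empty",
--     }
--     if not errors:
--         return False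
--     return any(error not in non_system_prefixes for error in errors)
-- ===== SOURCE B (Python) =====
-- _NON_SYSTEM_PREFIXES = (
--     "market_regime_not_trend_up_or_down",
--     "candidate_direction_not_trend_aligned",
--     "direction_regime_not_allowed",
--     "selected_exchange_filter_not_checked",
--     "selected_symbol_not_tradeable",
--     "selected_micro_notional_infeasible",
--     "required_quote_allocation_exceeds_max",
--     "top_candidates_empty",
-- )
--
--
-- def _is_system_anomaly(errors: list[str]) -> bool:
--     # Count how many entries are accounted for by the known non-system
--     # prefixes (the prefixes are distinct, so the counts partition those
--     # entries); any remainder is a system anomaly.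
--     accounted = sum(errors.count(p) for p in _NON_SYSTEM_PREFIXES)
--     return accounted != len(errors)
-- ===== Notes on version B (the rewrite author's own statement) =====
-- stated objective: alternative
-- what changed: Instead of scanning the input element-by-element with a membership test and early exit, B loops over the constant tuple of 8 known prefixes, counts each one's occurrences in the list, and reports an anomaly iff the accounted total differs from len(errors).
import Mathlib
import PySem

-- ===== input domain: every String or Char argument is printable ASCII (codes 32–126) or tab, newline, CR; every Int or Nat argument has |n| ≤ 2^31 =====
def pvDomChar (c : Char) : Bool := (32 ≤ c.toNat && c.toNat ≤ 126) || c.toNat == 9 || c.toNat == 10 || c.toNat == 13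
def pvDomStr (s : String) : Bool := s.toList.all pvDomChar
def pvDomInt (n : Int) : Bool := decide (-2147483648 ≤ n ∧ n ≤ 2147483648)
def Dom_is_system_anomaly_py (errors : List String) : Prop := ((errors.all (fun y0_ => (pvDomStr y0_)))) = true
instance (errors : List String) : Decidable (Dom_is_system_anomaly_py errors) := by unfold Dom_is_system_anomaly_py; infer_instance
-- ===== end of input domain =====

-- B replaces A's element-by-element membership scan by counting each known prefix's occurrences and comparing the total to the length (alternative; same behaviour).
-- ===== PORT A =====
def nonSystemPrefixes : PySem.Set String := PySem.Set.ofList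
  ["market_regime_not_trend_up_or_down",
   "candidate_direction_not_trend_aligned",
   "direction_regime_not_allowed",
   "selected_exchange_filter_not_checked",
   "selected_symbol_not_tradeable",
   "selected_micro_notional_infeasible",
   "required_quote_allocation_exceeds_max",
   "top_candidates_empty"]

def is_system_anomaly_py (errors : List String) : Bool :=
  if errors = [] then false
  else errors.any (fun error => !(PySem.Set.contains nonSystemPrefixes error))

-- ===== PORT B =====
def nonSystemPrefixList : List String :=
  ["market_regime_not_trend_up_or_down",
   "candidate_direction_not_trend_aligned",
   "direction_regime_not_allowed",
   "selected_exchange_filter_not_checked",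
   "selected_symbol_not_tradeable",
   "selected_micro_notional_infeasible",
   "required_quote_allocation_exceeds_max",
   "top_candidates_empty"]

def is_system_anomaly_py_alt (errors : List String) : Bool :=
  let accounted : Int := (nonSystemPrefixList.map (fun p => (PySem.List.count errors p : Int))).sum
  decide (accounted ≠ (errors.length : Int))

-- ===== PRECONDITION & SPEC =====
def Spec_is_system_anomaly_py (errors : List String) (out : Bool) : Prop := out = is_system_anomaly_py_alt errors
instance (errors : List String) (out : Bool) : Decidable (Spec_is_system_anomaly_py errors out) := by unfold Spec_is_system_anomaly_py; infer_instance

-- ===== CLAIM (what is proved, stated in full; the proofs are below) =====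
def Claim_equal_is_system_anomaly_py : Prop := ∀ (errors : List String), Dom_is_system_anomaly_py errors → Spec_is_system_anomaly_py errors (is_system_anomaly_py errors)

-- ===== LEMMAS AND PROOFS =====

-- Sigma_{p in L} (if p == e then 1 else 0) = (if e in L then 1 else 0) for duplicate-free L.
theorem sum_indicator_nodup (L : List String) (hL : L.Nodup) (e : String) :
    ((L.map (fun p => if p == e then (1 : Nat) else 0)).sum) = (if e ∈ L then (1 : Nat) else 0) := by
  induction L with
  | nil => simp
  | cons q L ih =>
    rcases List.nodup_cons.mp hL with ⟨hq, hL'⟩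
    simp only [List.map_cons, List.sum_cons]
    by_cases h : q = e
    · subst h
      rw [if_pos (beq_self_eq_true q), if_pos (List.mem_cons_self)]
      have hz : (L.map (fun p => if p == q then (1 : Nat) else 0)).sum = 0 := by
        apply List.sum_eq_zero
        intro x hx
        obtain ⟨p, hp, hpx⟩ := List.mem_map.mp hx
        have : ¬ (p == q) = true := by
          intro hbe
          exact hq ((beq_iff_eq).mp hbe ▸ hp)
        simp [this] at hpx
        omega
      omega
    · have hne : ¬ (q == e) = true := by
        intro hbe; exact h ((beq_iff_eq).mp hbe)
      rw [if_neg hne, ih hL']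
      have : (e ∈ q :: L) ↔ (e ∈ L) := by
        simp [List.mem_cons, Ne.symm h]
      simp [this]

-- The counts of a duplicate-free L partition the elements of `errors` lying in L.
theorem sum_counts_eq_countP (L : List String) (hL : L.Nodup) (errors : List String) :
    ((L.map (fun p => errors.count p)).sum) = errors.countP (fun e => decide (e ∈ L)) := by
  induction errors with
  | nil => simp
  | cons e es ih =>
    have hsplit : (L.map (fun p => (e :: es).count p)).sum
        = (L.map (fun p => es.count p)).sum
          + (L.map (fun p => if p == e then (1 : Nat) else 0)).sum := by
      rw [← List.sum_map_add]
      congr 1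
      apply List.map_congr_left
      intro p _
      rw [List.count_cons]
      congr 1
      by_cases h : p = e
      · subst h; simp
      · simp [h, Ne.symm h]
    rw [hsplit, ih, sum_indicator_nodup L hL e, List.countP_cons]
    by_cases h : e ∈ L <;> simp [h]

-- ===== VERDICT (by name: the statement is the Claim_ definition above) =====
theorem is_system_anomaly_py_spec : Claim_equal_is_system_anomaly_py := by
  intro errors _
  unfold Spec_is_system_anomaly_py is_system_anomaly_py is_system_anomaly_py_alt
  have hcount : ∀ p, PySem.List.count errors p = errors.count p := fun p => PySem.List.count_eq ..
  simp only [hcount]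
  have hcast : ((nonSystemPrefixList.map (fun p => ((errors.count p : Nat) : Int))).sum)
      = (((nonSystemPrefixList.map (fun p => errors.count p)).sum : Nat) : Int) := by
    rw [Nat.cast_list_sum, List.map_map]
    rfl
  have hsum := sum_counts_eq_countP nonSystemPrefixList (by decide) errors
  have hle : errors.countP (fun e => decide (e ∈ nonSystemPrefixList)) ≤ errors.length :=
    List.countP_le_length
  have hmem : ∀ e, PySem.Set.contains nonSystemPrefixes e = decide (e ∈ nonSystemPrefixList) := by
    intro e
    rw [Bool.eq_iff_iff]
    simp [PySem.Set.contains, nonSystemPrefixes, PySem.Set.mem_ofList, nonSystemPrefixList]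
  have hkey : (errors.countP (fun e => decide (e ∈ nonSystemPrefixList)) = errors.length)
      ↔ ∀ e ∈ errors, e ∈ nonSystemPrefixList := by
    rw [List.countP_eq_length]
    simp
  rw [Bool.eq_iff_iff]
  simp only [hcast, hsum, decide_eq_true_iff, ne_eq, Nat.cast_inj]
  constructor
  · intro h
    split_ifs at h with hnil
    simp only [List.any_eq_true, Bool.not_eq_true'] at h
    obtain ⟨e, he, hno⟩ := h
    rw [hmem e] at hno
    simp only [decide_eq_false_iff_not] at hno
    intro heq
    exact hno (hkey.mp heq e he)
  · intro h
    have hex : ∃ e ∈ errors, e ∉ nonSystemPrefixList := by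
      by_contra hall
      push Not at hall
      exact h (hkey.mpr hall)
    obtain ⟨e, he, hno⟩ := hex
    have hnil : errors ≠ [] := by
      intro h0; subst h0; simp at he
    rw [if_neg hnil]
    simp only [List.any_eq_true, Bool.not_eq_true']
    exact ⟨e, he, by rw [hmem e]; simpa using hno⟩
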